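-- pv_equiv track=rewrite | github.com/Fanomezantsoa2003/I_Just_Begin_Python | Calculatrice.py | formater_probleme
-- ===== SOURCE A (Python) =====
-- def formater_probleme(probleme):
--     formated = ''
--     i = 0
--     while i < len(probleme):
--         formated += probleme[i]
--         if probleme[i] != ' ':
--             # Si le caractère suivant existe et n'est pas >
--             if i + 1 < len(probleme) and probleme[i + 1]:
--                 formated += ' '
--         i += 1
--     return formated
-- ===== SOURCE B (Python) =====
-- def formater_probleme(probleme):
--     # Split on the space character into maximal runs of non-space characters; inside a run,
--     # ' '.join spaces the characters out; a non-empty run not at the very end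
--     # also gets the space after its last character; rejoin everything with the
--     # original space characters (the ' '.join separators).
--     tokens = probleme.split(' ')
--     last = tokens.pop()
--     pieces = [' '.join(t) + (' ' if t else '') for t in tokens]
--     pieces.append(' '.join(last))
--     return ' '.join(pieces)
-- ===== Notes on version B (the rewrite author's own statement) =====
-- stated objective: alternative
-- what changed: Instead of A's index loop with a lookahead test on every character, B splits the string on the space character into maximal non-space runs, spaces out each run with a character-level join, appends the inter-run space to each non-final run, and rejoins the pieces; no per-character conditional scan or index arithmetic remains.
import Mathlib
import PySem

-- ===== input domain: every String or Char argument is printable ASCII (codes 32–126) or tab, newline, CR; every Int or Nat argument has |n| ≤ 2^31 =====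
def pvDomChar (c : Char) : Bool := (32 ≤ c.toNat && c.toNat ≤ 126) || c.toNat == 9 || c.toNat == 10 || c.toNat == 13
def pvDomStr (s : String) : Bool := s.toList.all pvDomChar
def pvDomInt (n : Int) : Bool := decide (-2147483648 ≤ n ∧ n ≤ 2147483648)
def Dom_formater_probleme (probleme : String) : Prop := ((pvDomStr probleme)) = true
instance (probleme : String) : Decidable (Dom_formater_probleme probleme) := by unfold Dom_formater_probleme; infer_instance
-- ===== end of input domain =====

-- B replaces A's index/lookahead while-loop by split-on-space / per-run ' '.join / rejoin
-- (alternative decomposition; same result everywhere).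


-- ===== PORT A =====
-- A's while loop over i: at each step append probleme[i], and if probleme[i] != ' '
-- and i+1 < len(probleme) (the extra truthiness test `probleme[i+1]` on a 1-char
-- string is always true) append a space.  Ported as the structural recursion over
-- the remaining characters (head = probleme[i], `i+1 < len` = rest nonempty), with
-- the same growing accumulator `formated`.
def pvLoopA : List Char → List Char → List Char
  | acc, [] => acc
  | acc, c :: tl =>
      let acc := acc ++ [c]
      let acc := if c ≠ ' ' ∧ tl ≠ [] then acc ++ [' '] else acc
      pvLoopA acc tl

def formater_probleme (probleme : String) : String :=
  String.mk (pvLoopA [] probleme.toList)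

-- ===== PORT B =====
-- B: tokens = probleme.split(' '); last = tokens.pop();
--    pieces = [' '.join(t) + (' ' if t else '') for t in tokens];
--    pieces.append(' '.join(last)); return ' '.join(pieces)
-- (tokens.pop() never raises: split always returns a non-empty list; the none
-- branch below is an unreachable totality guard.)
def formater_probleme_alt (probleme : String) : String :=
  let tokens := PySem.Chars.splitOn probleme.toList [' ']
  match PySem.List.pop? tokens with
  | none => ""
  | some (last, init) =>
      let pieces := init.map (fun t =>
        PySem.Chars.join [' '] (t.map (fun c => [c])) ++ (if t ≠ [] then [' '] else []))
      let pieces := pieces ++ [PySem.Chars.join [' '] (last.map (fun c => [c]))]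
      String.mk (PySem.Chars.join [' '] pieces)

-- ===== PRECONDITION & SPEC =====
def Spec_formater_probleme (probleme : String) (out : String) : Prop := out = formater_probleme_alt probleme
instance (probleme : String) (out : String) : Decidable (Spec_formater_probleme probleme out) := by unfold Spec_formater_probleme; infer_instance

-- ===== CLAIM (what is proved, stated in full; the proofs are below) =====
def Claim_equal_formater_probleme : Prop := ∀ (probleme : String), Dom_formater_probleme probleme → Spec_formater_probleme probleme (formater_probleme probleme)

-- ===== LEMMAS AND PROOFS =====

-- common specification: each char, plus a space after a non-space char that is not last
def pvIns : List Char → List Char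
  | [] => []
  | c :: tl => c :: (if c ≠ ' ' ∧ tl ≠ [] then ' ' :: pvIns tl else pvIns tl)

theorem pvLoopA_eq (l acc : List Char) : pvLoopA acc l = acc ++ pvIns l := by
  induction l generalizing acc with
  | nil => simp [pvLoopA, pvIns]
  | cons c tl ih =>
      by_cases h : c ≠ ' ' ∧ tl ≠ [] <;> simp [pvLoopA, pvIns, h, ih]

-- recursive model of str.split(' ')
def pvHeadCat (x : List Char) : List (List Char) → List (List Char)
  | [] => [x]
  | t :: ts => (x ++ t) :: ts

def pvSplit : List Char → List (List Char)
  | [] => [[]]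
  | c :: tl => if c = ' ' then [] :: pvSplit tl else pvHeadCat [c] (pvSplit tl)

theorem pvSplit_ne_nil (l : List Char) : pvSplit l ≠ [] := by
  cases l with
  | nil => simp [pvSplit]
  | cons c tl =>
      by_cases h : c = ' '
      · simp [pvSplit, h]
      · simp only [pvSplit, h]
        cases pvSplit tl <;> simp [pvHeadCat]

theorem pvSplit_go_eq (l : List Char) : ∀ (fuel : Nat) (cur : List Char) (acc : List (List Char)),
    l.length < fuel →
    PySem.Chars.splitOn.go [' '] fuel l cur acc
      = acc.reverse ++ pvHeadCat cur.reverse (pvSplit l) := by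
  induction l with
  | nil =>
      intro fuel cur acc h
      cases fuel with
      | zero => omega
      | succ f => simp [PySem.Chars.splitOn.go, pvSplit, pvHeadCat]
  | cons c tl ih =>
      intro fuel cur acc h
      cases fuel with
      | zero => omega
      | succ f =>
          by_cases hc : c = ' '
          · subst hc
            rw [show PySem.Chars.splitOn.go [' '] (f+1) (' ' :: tl) cur acc
                  = PySem.Chars.splitOn.go [' '] f tl [] (cur.reverse :: acc) by
                simp [PySem.Chars.splitOn.go, List.isPrefixOf]]
            rw [ih f [] (cur.reverse :: acc) (by simpa using h)]
            cases hts : pvSplit tl with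
            | nil => exact absurd hts (pvSplit_ne_nil tl)
            | cons t ts => simp [pvSplit, pvHeadCat, hts]
          · rw [show PySem.Chars.splitOn.go [' '] (f+1) (c :: tl) cur acc
                  = PySem.Chars.splitOn.go [' '] f tl (c :: cur) acc by
                have h' : (' ' == c && true) = false := by
                  simp only [Bool.and_true, beq_eq_false_iff_ne, ne_eq]
                  exact fun h => hc h.symm
                simp only [PySem.Chars.splitOn.go, List.isPrefixOf, h', Bool.false_eq_true,
                  if_false]]
            rw [ih f (c :: cur) acc (by simpa using h)]
            cases hts : pvSplit tl with
            | nil => exact absurd hts (pvSplit_ne_nil tl)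
            | cons t ts => simp [pvSplit, pvHeadCat, hc, hts]

theorem pvSplitOn_eq (l : List Char) : PySem.Chars.splitOn l [' '] = pvSplit l := by
  rw [PySem.Chars.splitOn, pvSplit_go_eq l (l.length + 1) [] [] (by omega)]
  cases h : pvSplit l with
  | nil => exact absurd h (pvSplit_ne_nil l)
  | cons t ts => simp [pvHeadCat]

-- ' '.join of the characters of t
def pvSJ (t : List Char) : List Char := PySem.Chars.join [' '] (t.map (fun c => [c]))

theorem pvSJ_nil : pvSJ [] = [] := rfl

theorem pvSJ_cons (c : Char) (t : List Char) :
    pvSJ (c :: t) = if t = [] then [c] else c :: ' ' :: pvSJ t := by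
  cases t with
  | nil => rfl
  | cons d t' => simp [pvSJ, PySem.Chars.join, List.intercalate]

theorem pvJoin_cons (x q : List Char) (p : List (List Char)) :
    PySem.Chars.join [' '] (x :: (p ++ [q])) = x ++ ' ' :: PySem.Chars.join [' '] (p ++ [q]) := by
  cases p <;> simp [PySem.Chars.join, List.intercalate]

-- the combine stage of B, as a direct recursion on the token list
def pvComb : List (List Char) → List Char
  | [] => []
  | [t] => pvSJ t
  | t :: ts => (pvSJ t ++ (if t ≠ [] then [' '] else [])) ++ ' ' :: pvComb ts

theorem pvPop_cons (t : List Char) (ts : List (List Char)) :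
    PySem.List.pop? (t :: ts) = some ((t :: ts).getLast (by simp), (t :: ts).dropLast) := by
  simp only [PySem.List.pop?, PySem.List.pyIdx?]
  norm_num
  refine ⟨List.getElem_cons_length rfl, ?_⟩
  rw [show ts.length = (t :: ts).length - 1 by simp]
  exact List.eraseIdx_length_sub_one

-- B's map/append/join body equals pvComb on any non-empty token list
theorem pvBody_eq (ts : List (List Char)) (t : List Char) :
    PySem.Chars.join [' ']
      (((t :: ts).dropLast.map (fun t =>
          PySem.Chars.join [' '] (t.map (fun c => [c])) ++ (if t ≠ [] then [' '] else [])))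
        ++ [PySem.Chars.join [' '] ((((t :: ts)).getLast (by simp)).map (fun c => [c]))])
      = pvComb (t :: ts) := by
  induction ts generalizing t with
  | nil => simp [pvComb, pvSJ, PySem.Chars.join, List.intercalate]
  | cons s ts' ih =>
      rw [show (t :: s :: ts').dropLast = t :: (s :: ts').dropLast by simp,
          show (t :: s :: ts').getLast (by simp) = (s :: ts').getLast (by simp) by
            simp [List.getLast_cons]]
      simp only [List.map_cons, List.cons_append]
      rw [pvJoin_cons, ih s]
      cases ts' <;> simp [pvComb, pvSJ]

theorem pvSplit_eq_single_nil (l : List Char) (h : pvSplit l = [[]]) : l = [] := by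
  cases l with
  | nil => rfl
  | cons c tl =>
      exfalso
      by_cases hc : c = ' '
      · rw [pvSplit, if_pos hc] at h
        injection h with _ h2
        exact pvSplit_ne_nil tl h2
      · rw [pvSplit, if_neg hc] at h
        cases h' : pvSplit tl with
        | nil => exact pvSplit_ne_nil tl h'
        | cons a b =>
            rw [h', pvHeadCat] at h
            simp at h

-- key lemma: B's pipeline on the split of l computes pvIns l
theorem pvComb_pvSplit (l : List Char) : pvComb (pvSplit l) = pvIns l := by
  induction l with
  | nil => simp [pvSplit, pvComb, pvIns, pvSJ_nil]
  | cons c tl ih =>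
      by_cases hc : c = ' '
      · subst hc
        rw [show pvSplit (' ' :: tl) = [] :: pvSplit tl by simp [pvSplit]]
        cases hts : pvSplit tl with
        | nil => exact absurd hts (pvSplit_ne_nil tl)
        | cons t ts =>
            rw [hts] at ih
            simp [pvComb, pvIns, pvSJ_nil, ← ih]
      · cases hts : pvSplit tl with
        | nil => exact absurd hts (pvSplit_ne_nil tl)
        | cons t ts =>
            rw [hts] at ih
            rw [show pvSplit (c :: tl) = (c :: t) :: ts by simp [pvSplit, hc, hts, pvHeadCat]]
            cases ts with
            | nil =>
                by_cases ht : t = []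
                · subst ht
                  have htl : tl = [] := pvSplit_eq_single_nil tl hts
                  subst htl
                  simp [pvComb, pvIns, pvSJ_cons, hc]
                · have htl : tl ≠ [] := by
                    intro h; subst h
                    simp [pvSplit] at hts
                    exact ht hts
                  simp only [pvComb] at ih
                  simp [pvComb, pvIns, pvSJ_cons, hc, ht, htl, ih]
            | cons s ts' =>
                have htl : tl ≠ [] := by
                  intro h; subst h; simp [pvSplit] at hts
                by_cases ht : t = []
                · subst ht
                  simp only [pvComb, pvIns] at *
                  simp [pvSJ_cons, pvSJ_nil, hc, htl, ← ih]
                · simp only [pvComb, pvIns] at *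
                  simp [pvSJ_cons, hc, ht, htl, ← ih]

theorem alt_eq (p : String) : formater_probleme_alt p = String.mk (pvIns p.toList) := by
  obtain ⟨t, ts, hts⟩ : ∃ t ts, pvSplit p.toList = t :: ts := by
    cases h : pvSplit p.toList with
    | nil => exact absurd h (pvSplit_ne_nil _)
    | cons a b => exact ⟨a, b, rfl⟩
  simp only [formater_probleme_alt, pvSplitOn_eq, hts, pvPop_cons]
  rw [pvBody_eq ts t, ← hts, pvComb_pvSplit]

-- ===== VERDICT (by name: the statement is the Claim_ definition above) =====
theorem formater_probleme_spec : Claim_equal_formater_probleme := by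
  intro p _
  show _ = _
  rw [alt_eq, formater_probleme, pvLoopA_eq]
  rfl
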